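-- pv_equiv track=rewrite | github.com/ghamarian/mfma | mfma_viz_app.py | _pack_indices
-- ===== SOURCE A (Python) =====
-- from typing import Dict, List, Tuple, Optional
--
-- def _pack_indices(indices: List[int], pack_factor: int) -> List[List[Optional[int]]]:
--     """Slice linear indices into VGPR-sized chunks, each chunk has up to pack_factor elements."""
--     out = []
--     for i in range(0, len(indices), pack_factor):
--         chunk = indices[i:i+pack_factor]
--         if len(chunk) < pack_factor:
--             chunk = chunk + [None] * (pack_factor - len(chunk))  # pad for table
--         out.append(chunk)
--     return out
-- ===== SOURCE B (Python) =====
-- from typing import Dict, List, Tuple, Optional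
--
-- def _pack_indices(indices: List[int], pack_factor: int) -> List[List[Optional[int]]]:
--     """Single pass over the elements with a growing current chunk; flush when full, pad the leftover."""
--     if pack_factor <= 0:
--         return []
--     out = []
--     cur = []
--     for x in indices:
--         cur.append(x)
--         if len(cur) == pack_factor:
--             out.append(cur)
--             cur = []
--     if cur:
--         out.append(cur + [None] * (pack_factor - len(cur)))
--     return out
-- ===== Notes on version B (the rewrite author's own statement) =====
-- stated objective: alternative
-- what changed: B iterates once over the elements themselves, growing a current chunk that is flushed when it reaches pack_factor and padded at the end, instead of A's index-stride loop that slices the list and conditionally pads each short slice.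
-- outside the precondition, e.g. on _pack_indices([1, 2], 0): A raises ValueError, B returns []
import Mathlib
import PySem

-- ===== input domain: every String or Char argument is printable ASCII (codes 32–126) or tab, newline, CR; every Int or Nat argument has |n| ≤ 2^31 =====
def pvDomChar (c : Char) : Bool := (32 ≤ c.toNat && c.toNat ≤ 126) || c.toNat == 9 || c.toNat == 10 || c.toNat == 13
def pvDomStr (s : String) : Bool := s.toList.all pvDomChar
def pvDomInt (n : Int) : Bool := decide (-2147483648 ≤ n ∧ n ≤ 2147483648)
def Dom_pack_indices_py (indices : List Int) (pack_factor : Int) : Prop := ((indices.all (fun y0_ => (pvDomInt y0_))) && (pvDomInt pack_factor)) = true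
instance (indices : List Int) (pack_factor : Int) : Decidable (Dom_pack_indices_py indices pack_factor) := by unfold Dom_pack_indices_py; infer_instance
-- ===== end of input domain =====

-- B replaces A's index-stride slicing loop by a single element-wise pass that grows a
-- current chunk, flushes it when full and pads the leftover once (alternative, same cost).

-- ===== PORT A =====
def pack_indices_py (indices : List Int) (pack_factor : Int) : List (List (Option Int)) :=
  (PySem.List.pyRange 0 (indices.length : Int) pack_factor).foldl
    (fun out i =>
      let chunk := PySem.List.slice indices (some i) (some (i + pack_factor))
      let chunk' : List (Option Int) :=
        if (chunk.length : Int) < pack_factor then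
          chunk.map Option.some ++ List.replicate (pack_factor - (chunk.length : Int)).toNat (none : Option Int)
        else chunk.map Option.some
      out ++ [chunk'])
    []

-- ===== PORT B =====
def pack_indices_py_alt (indices : List Int) (pack_factor : Int) : List (List (Option Int)) :=
  if pack_factor ≤ 0 then []
  else
    let st := indices.foldl
      (fun (s : List (List (Option Int)) × List (Option Int)) x =>
        let cur := s.2 ++ [some x]
        if (cur.length : Int) = pack_factor then (s.1 ++ [cur], []) else (s.1, cur))
      ([], [])
    if st.2 = [] then st.1
    else st.1 ++ [st.2 ++ List.replicate (pack_factor - (st.2.length : Int)).toNat (none : Option Int)]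

-- ===== PRECONDITION & SPEC =====
-- Pre_ excludes only pack_factor = 0, where Python A raises ValueError (range() step 0).
def Pre_pack_indices_py (indices : List Int) (pack_factor : Int) : Prop := pack_factor ≠ 0
instance (indices : List Int) (pack_factor : Int) : Decidable (Pre_pack_indices_py indices pack_factor) := by unfold Pre_pack_indices_py; infer_instance

def pvWitness_pack_indices_py : List Int × Int := ([1, 2, 3], 2)

def Spec_pack_indices_py (indices : List Int) (pack_factor : Int) (out : List (List (Option Int))) : Prop := out = pack_indices_py_alt indices pack_factor
instance (indices : List Int) (pack_factor : Int) (out : List (List (Option Int))) : Decidable (Spec_pack_indices_py indices pack_factor out) := by unfold Spec_pack_indices_py; infer_instance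

-- ===== CLAIM (what is proved, stated in full; the proofs are below) =====
def Claim_equal_pack_indices_py : Prop := ∀ (indices : List Int) (pack_factor : Int), Dom_pack_indices_py indices pack_factor → Pre_pack_indices_py indices pack_factor → Spec_pack_indices_py indices pack_factor (pack_indices_py indices pack_factor)

-- ===== LEMMAS AND PROOFS =====

-- canonical chunking of the raw list, with per-chunk padding
def packA : List Int → Nat → List (List (Option Int))
  | [], _ => []
  | _ :: _, 0 => []
  | x :: xs, (q+1) =>
      ((x :: xs.take q).map Option.some ++ List.replicate (q - xs.length) (none : Option Int))
        :: packA (xs.drop q) (q+1)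
termination_by l _ => l.length
decreasing_by simp

theorem packA_nil (p : Nat) : packA [] p = [] := by rw [packA.eq_def]

theorem packA_cons (x : Int) (xs : List Int) (q : Nat) :
    packA (x :: xs) (q+1)
      = ((x :: xs.take q).map Option.some ++ List.replicate (q - xs.length) (none : Option Int))
          :: packA (xs.drop q) (q+1) := by
  rw [packA.eq_def]

theorem packA_cons' (l : List Int) (hl : l ≠ []) (p : Nat) (hp : 0 < p) :
    packA l p
      = ((l.take p).map Option.some ++ List.replicate (p - (l.take p).length) (none : Option Int))
          :: packA (l.drop p) p := by
  obtain ⟨x, xs, rfl⟩ := List.exists_cons_of_ne_nil hl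
  obtain ⟨q, rfl⟩ : ∃ q, p = q + 1 := ⟨p - 1, by omega⟩
  rw [packA_cons, List.take_succ_cons, List.drop_succ_cons]
  congr 3
  simp [List.length_take]
  omega

theorem pyRange_pos_nil (a b s : Int) (hs : 0 < s) (h : b ≤ a) :
    PySem.List.pyRange a b s = [] := by
  rw [PySem.List.pyRange_of_pos a b hs, if_neg (by omega)]
  simp

theorem pyRange_neg_nil (s b : Int) (hs : s < 0) (hb : 0 ≤ b) :
    PySem.List.pyRange 0 b s = [] := by
  unfold PySem.List.pyRange
  rw [if_neg (by omega : ¬ s = 0), if_neg (by omega : ¬ 0 < s), if_neg (by omega : ¬ b < 0)]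
  simp

theorem pyRange_pos_cons (a b s : Int) (hs : 0 < s) (hab : a < b) :
    PySem.List.pyRange a b s = a :: PySem.List.pyRange (a+s) b s := by
  rw [PySem.List.pyRange_of_pos a b hs, PySem.List.pyRange_of_pos (a+s) b hs, if_pos hab]
  have hkey : ((b - a + s - 1) / s).toNat
      = (if a + s < b then ((b - (a+s) + s - 1) / s).toNat else 0) + 1 := by
    have h1 : b - a + s - 1 = (b - a - 1) + 1 * s := by ring
    have h2 : (b - a + s - 1) / s = (b - a - 1) / s + 1 := by
      rw [h1, Int.add_mul_ediv_right _ _ (by omega)]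
    have h3 : 0 ≤ (b - a - 1) / s := Int.ediv_nonneg (by omega) (by omega)
    by_cases hc : a + s < b
    · rw [if_pos hc]
      have h4 : b - (a+s) + s - 1 = b - a - 1 := by ring
      rw [h4]
      omega
    · rw [if_neg hc]
      have h4 : (b - a - 1) / s = 0 := Int.ediv_eq_zero_of_lt (by omega) (by omega)
      omega
  rw [hkey, List.range_succ_eq_map, List.map_cons, List.map_map]
  congr 1
  · simp
  · apply List.map_congr_left
    intro k _
    simp [Function.comp, Nat.succ_eq_add_one]
    ring

-- A's index-stride loop computes packA
theorem A_loop (l : List Int) (pf : Int) (hpf : 0 < pf) :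
    ∀ (n : Nat) (a : Int) (acc : List (List (Option Int))), 0 ≤ a →
      (((l.length : Int)) - a).toNat ≤ n →
      (PySem.List.pyRange a (l.length : Int) pf).foldl
        (fun out i =>
          let chunk := PySem.List.slice l (some i) (some (i + pf))
          let chunk' : List (Option Int) :=
            if (chunk.length : Int) < pf then
              chunk.map Option.some ++ List.replicate (pf - (chunk.length : Int)).toNat (none : Option Int)
            else chunk.map Option.some
          out ++ [chunk']) acc
      = acc ++ packA (l.drop a.toNat) pf.toNat := by
  intro n
  induction n with
  | zero =>
    intro a acc ha hn
    rw [pyRange_pos_nil _ _ _ hpf (by omega)]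
    have hnil : l.drop a.toNat = [] := List.drop_eq_nil_of_le (by omega)
    simp [hnil, packA_nil]
  | succ n ih =>
    intro a acc ha hn
    by_cases hab : a < (l.length : Int)
    · rw [pyRange_pos_cons _ _ _ hpf hab, List.foldl_cons,
        ih (a + pf) _ (by omega) (by omega)]
      dsimp only
      set t := l.drop a.toNat with ht
      have htlen : t.length = l.length - a.toNat := by simp [ht]
      have hslice : PySem.List.slice l (some a) (some (a + pf)) = t.take pf.toNat := by
        rw [PySem.List.slice_toNat l ha (by omega)]
        congr 1
        omega
      have hchunk' :
          (if (((PySem.List.slice l (some a) (some (a + pf))).length : Int)) < pf then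
              (PySem.List.slice l (some a) (some (a + pf))).map Option.some ++
                List.replicate (pf - (((PySem.List.slice l (some a) (some (a + pf))).length : Int))).toNat (none : Option Int)
            else (PySem.List.slice l (some a) (some (a + pf))).map Option.some)
          = (t.take pf.toNat).map Option.some ++
              List.replicate (pf.toNat - (t.take pf.toNat).length) (none : Option Int) := by
        rw [hslice]
        split_ifs with hlt
        · have hc : (pf - ((t.take pf.toNat).length : Int)).toNat
              = pf.toNat - (t.take pf.toNat).length := by omega
          rw [hc]
        · have hc : pf.toNat - (t.take pf.toNat).length = 0 := by
            simp only [List.length_take] at hlt ⊢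
            omega
          rw [hc]
          simp
      rw [hchunk']
      have hdrop : l.drop (a + pf).toNat = t.drop pf.toNat := by
        rw [ht, List.drop_drop]
        congr 1
        omega
      rw [hdrop]
      have htne : t ≠ [] := by
        intro hnil
        rw [hnil] at htlen
        simp at htlen
        omega
      rw [packA_cons' t htne pf.toNat (by omega)]
      simp
    · rw [pyRange_pos_nil _ _ _ hpf (by omega)]
      have hnil : l.drop a.toNat = [] := List.drop_eq_nil_of_le (by omega)
      simp [hnil, packA_nil]

-- B's element-wise accumulator loop, started with partial chunk c, computes packA (c ++ l)
theorem B_loop (pf : Int) (hpf : 0 < pf) :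
    ∀ (l c : List Int) (out : List (List (Option Int))), (c.length : Int) < pf →
      (let st := l.foldl
        (fun (s : List (List (Option Int)) × List (Option Int)) x =>
          let cur := s.2 ++ [some x]
          if (cur.length : Int) = pf then (s.1 ++ [cur], []) else (s.1, cur))
        (out, c.map Option.some);
       if st.2 = [] then st.1
       else st.1 ++ [st.2 ++ List.replicate (pf - (st.2.length : Int)).toNat (none : Option Int)])
      = out ++ packA (c ++ l) pf.toNat := by
  intro l
  induction l with
  | nil =>
    intro c out hc
    simp only [List.foldl_nil, List.append_nil]
    by_cases hcn : c = []
    · subst hcn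
      simp [packA_nil]
    · have hmn : c.map Option.some ≠ [] := by simp [hcn]
      rw [if_neg hmn]
      rw [packA_cons' c hcn pf.toNat (by omega)]
      have htake : c.take pf.toNat = c := List.take_of_length_le (by omega)
      have hdrop : c.drop pf.toNat = [] := List.drop_eq_nil_of_le (by omega)
      rw [htake, hdrop, packA_nil]
      have hlen : (pf - (((c.map Option.some).length : Int))).toNat
          = pf.toNat - c.length := by simp only [List.length_map]; omega
      rw [hlen]
  | cons x xs ih =>
    intro c out hc
    simp only [List.foldl_cons]
    have hcur : (c.map Option.some) ++ [some x] = (c ++ [x]).map Option.some := by simp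
    by_cases hfull : ((((c.map Option.some) ++ [some x]).length : Int)) = pf
    · rw [if_pos hfull]
      have h0 : ((([] : List Int)).length : Int) < pf := by simp; omega
      have := ih [] (out ++ [c.map Option.some ++ [some x]]) h0
      simp only [List.map_nil, List.nil_append] at this
      rw [this]
      have hlenc : c.length + 1 = pf.toNat := by simp at hfull; omega
      have hne : c ++ x :: xs ≠ [] := by simp
      rw [packA_cons' (c ++ x :: xs) hne pf.toNat (by omega)]
      have htake : (c ++ x :: xs).take pf.toNat = c ++ [x] := by
        have : c ++ x :: xs = (c ++ [x]) ++ xs := by simp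
        rw [this, List.take_append]
        have h1 : (c ++ [x]).take pf.toNat = c ++ [x] := List.take_of_length_le (by simp; omega)
        have h2 : pf.toNat - (c ++ [x]).length = 0 := by simp; omega
        rw [h1, h2]
        simp
      have hdrop : (c ++ x :: xs).drop pf.toNat = xs := by
        have : c ++ x :: xs = (c ++ [x]) ++ xs := by simp
        rw [this, List.drop_append]
        have h1 : (c ++ [x]).drop pf.toNat = [] := List.drop_eq_nil_of_le (by simp; omega)
        have h2 : pf.toNat - (c ++ [x]).length = 0 := by simp; omega
        rw [h1, h2]
        simp
      rw [htake, hdrop]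
      have hrep : pf.toNat - (c ++ [x]).length = 0 := by simp; omega
      rw [hrep]
      simp
    · rw [if_neg hfull]
      have hlt : (((c ++ [x]).length : Int)) < pf := by
        simp at hfull ⊢; omega
      have := ih (c ++ [x]) out hlt
      rw [hcur]
      rw [this]
      simp

-- ===== VERDICT (by name: the statement is the Claim_ definition above) =====
theorem pack_indices_py_spec : Claim_equal_pack_indices_py := by
  intro indices pf _ hpre
  show pack_indices_py indices pf = pack_indices_py_alt indices pf
  rcases lt_trichotomy pf 0 with h | h | h
  · unfold pack_indices_py pack_indices_py_alt
    rw [if_pos (le_of_lt h), pyRange_neg_nil _ _ h (by omega)]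
    simp
  · exact absurd h hpre
  · have hA : pack_indices_py indices pf = packA indices pf.toNat := by
      unfold pack_indices_py
      rw [A_loop indices pf h (((indices.length : Int)) - 0).toNat 0 [] (le_refl 0) (le_refl _)]
      simp
    have hB : pack_indices_py_alt indices pf = packA indices pf.toNat := by
      unfold pack_indices_py_alt
      rw [if_neg (by omega)]
      have := B_loop pf h indices [] [] (by simp; omega)
      simp only [List.map_nil, List.nil_append] at this
      exact this
    rw [hA, hB]
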